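-- pv_equiv track=rewrite | github.com/radicalalpaca/python-pc | lectures/compmath/xxyyzz_2(4).py | CountEuclid
-- ===== SOURCE A (Python) =====
-- def CountEuclid(a, b):
--     n_steps = 0
--     r_0, r_1 = a, b
--     x_0, x_1 = 1, 0
--     y_0, y_1 = 0, 1
--     while r_1 != 0:
--         n_steps += 1
--         q = r_0 // r_1
--         r_0, r_1 = r_1, r_0 - q * r_1
--         x_0, x_1 = x_1, x_0 - q * x_1
--         y_0, y_1 = y_1, y_0 - q * y_1
--     return r_0, n_steps
-- ===== SOURCE B (Python) =====
-- def CountEuclid(a, b):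
--     if b == 0:
--         return a, 0
--     g, n = CountEuclid(b, a % b)
--     return g, n + 1
-- ===== Notes on version B (the rewrite author's own statement) =====
-- stated objective: simpler
-- what changed: Replaced the iterative loop carrying six state variables (including the unused Bezout coefficients x/y) by a plain recursive gcd that counts steps as recursion depth.
import Mathlib
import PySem

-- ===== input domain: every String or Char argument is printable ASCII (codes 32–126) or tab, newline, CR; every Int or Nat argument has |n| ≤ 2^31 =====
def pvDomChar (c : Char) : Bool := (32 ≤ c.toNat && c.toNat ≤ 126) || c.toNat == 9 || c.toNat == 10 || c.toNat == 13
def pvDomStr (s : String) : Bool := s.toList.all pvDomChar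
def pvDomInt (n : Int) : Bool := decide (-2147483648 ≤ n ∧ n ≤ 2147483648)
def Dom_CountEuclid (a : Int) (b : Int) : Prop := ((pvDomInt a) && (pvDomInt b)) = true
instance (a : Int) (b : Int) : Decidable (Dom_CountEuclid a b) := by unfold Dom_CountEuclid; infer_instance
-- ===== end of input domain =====

-- B replaces A's six-variable iterative loop (with unused Bezout coefficients) by a
-- plain recursive gcd counting steps as recursion depth; objective: simpler.


-- termination lemma cited by both ports: the new remainder shrinks in absolute value
theorem pvRem_natAbs_lt (r0 r1 : Int) (h : r1 ≠ 0) :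
    (r0 - PySem.Int.floordiv r0 r1 * r1).natAbs < r1.natAbs := by
  have hfm := PySem.Int.floordiv_mul_add_mod r0 r1
  rcases lt_or_gt_of_ne h with hneg | hpos
  · have := PySem.Int.mod_neg_bounds r0 hneg
    omega
  · have h1 := PySem.Int.mod_nonneg r0 hpos
    have h2 := PySem.Int.mod_lt r0 hpos
    omega

-- ===== PORT A =====
-- the while loop of A, one recursive step per iteration, same six state variables
def pvEuclidLoop (r0 r1 x0 x1 y0 y1 n : Int) : Int × Int :=
  if h : r1 = 0 then (r0, n)
  else
    let q := PySem.Int.floordiv r0 r1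
    pvEuclidLoop r1 (r0 - q * r1) x1 (x0 - q * x1) y1 (y0 - q * y1) (n + 1)
termination_by r1.natAbs
decreasing_by exact pvRem_natAbs_lt r0 r1 h

def CountEuclid (a : Int) (b : Int) : Int × Int :=
  pvEuclidLoop a b 1 0 0 1 0

-- ===== PORT B =====
def CountEuclid_alt (a : Int) (b : Int) : Int × Int :=
  if h : b = 0 then (a, 0)
  else
    let p := CountEuclid_alt b (PySem.Int.mod a b)
    (p.1, p.2 + 1)
termination_by b.natAbs
decreasing_by
  have hfm := PySem.Int.floordiv_mul_add_mod a b
  have := pvRem_natAbs_lt a b h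
  omega

-- ===== PRECONDITION & SPEC =====
def Spec_CountEuclid (a : Int) (b : Int) (out : Int × Int) : Prop := out = CountEuclid_alt a b
instance (a : Int) (b : Int) (out : Int × Int) : Decidable (Spec_CountEuclid a b out) := by unfold Spec_CountEuclid; infer_instance

-- ===== CLAIM (what is proved, stated in full; the proofs are below) =====
def Claim_equal_CountEuclid : Prop := ∀ (a : Int) (b : Int), Dom_CountEuclid a b → Spec_CountEuclid a b (CountEuclid a b)

-- ===== LEMMAS AND PROOFS =====

theorem pvMod_eq (a b : Int) : PySem.Int.mod a b = a - PySem.Int.floordiv a b * b := by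
  have := PySem.Int.floordiv_mul_add_mod a b
  omega

-- loop invariant: the loop computes B's gcd, with n added to B's step count;
-- the x/y coefficients never influence the result
theorem pvLoop_eq : ∀ (k : Nat) (r0 r1 x0 x1 y0 y1 n : Int), r1.natAbs = k →
    pvEuclidLoop r0 r1 x0 x1 y0 y1 n
      = ((CountEuclid_alt r0 r1).1, n + (CountEuclid_alt r0 r1).2) := by
  intro k
  induction k using Nat.strong_induction_on with
  | _ k ih =>
    intro r0 r1 x0 x1 y0 y1 n hk
    by_cases h : r1 = 0
    · rw [pvEuclidLoop, CountEuclid_alt]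
      simp [h]
    · rw [pvEuclidLoop, CountEuclid_alt]
      simp only [h, dif_neg, not_false_iff]
      have hlt : (r0 - PySem.Int.floordiv r0 r1 * r1).natAbs < k := hk ▸ pvRem_natAbs_lt r0 r1 h
      rw [ih _ hlt r1 (r0 - PySem.Int.floordiv r0 r1 * r1) x1 (x0 - PySem.Int.floordiv r0 r1 * x1)
            y1 (y0 - PySem.Int.floordiv r0 r1 * y1) (n + 1) rfl,
          (pvMod_eq r0 r1).symm]
      simp only [Prod.mk.injEq]
      exact ⟨trivial, by omega⟩

-- ===== VERDICT (by name: the statement is the Claim_ definition above) =====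
theorem CountEuclid_spec : Claim_equal_CountEuclid := by
  intro a b _
  unfold Spec_CountEuclid CountEuclid
  rw [pvLoop_eq b.natAbs a b 1 0 0 1 0 rfl]
  exact Prod.ext rfl (zero_add _)
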